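-- pv_equiv track=rewrite | github.com/wengao65-svg/SimFlow | plugins/simflow/runtime/lib/verification.py | _rollup_status
-- ===== SOURCE A (Python) =====
-- from typing import Any, Callable, Optional
--
-- def _rollup_status(checks: list[dict[str, Any]]) -> str:
--     overall = "pass"
--     for check in checks:
--         status = check.get("status")
--         if status == "fail":
--             return "fail"
--         if status == "warning":
--             overall = "warning"
--     return overall
-- ===== SOURCE B (Python) =====
-- def _rollup_status(checks: list) -> str:
--     statuses = {c.get("status") for c in checks}
--     if "fail" in statuses:
--         return "fail"
--     if "warning" in statuses:
--         return "warning"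
--     return "pass"
-- ===== Notes on version B (the rewrite author's own statement) =====
-- stated objective: alternative
-- what changed: Replaces the single accumulating early-exit loop with a build-then-probe design: materialize the distinct status values as a set once, then answer by two membership tests in precedence order.
import Mathlib
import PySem

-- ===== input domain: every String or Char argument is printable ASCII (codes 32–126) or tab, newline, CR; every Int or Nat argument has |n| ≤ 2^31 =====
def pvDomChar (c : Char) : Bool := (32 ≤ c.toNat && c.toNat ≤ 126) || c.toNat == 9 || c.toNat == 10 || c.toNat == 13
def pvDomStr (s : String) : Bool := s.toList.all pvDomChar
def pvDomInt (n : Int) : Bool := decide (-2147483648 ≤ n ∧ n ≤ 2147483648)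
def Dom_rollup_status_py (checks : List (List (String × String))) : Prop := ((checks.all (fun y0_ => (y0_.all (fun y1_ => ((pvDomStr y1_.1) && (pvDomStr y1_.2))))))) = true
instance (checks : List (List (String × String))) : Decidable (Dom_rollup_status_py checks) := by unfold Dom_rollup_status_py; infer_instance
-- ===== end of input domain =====

-- B replaces A's accumulating early-exit loop with "build the set of distinct statuses, then probe it"
-- (alternative decomposition, same O(n) cost); return-value equivalence is proved on all inputs.

-- ===== PORT A =====
-- literal port of A's loop: early return on "fail", accumulator downgraded to "warning"
def rollupGoA (checks : List (List (String × String))) (overall : String) : String :=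
  match checks with
  | [] => overall
  | check :: rest =>
    let status := (PySem.Dict.mk check).get? "status"
    if status = some "fail" then "fail"
    else if status = some "warning" then rollupGoA rest "warning"
    else rollupGoA rest overall

def rollup_status_py (checks : List (List (String × String))) : String :=
  rollupGoA checks "pass"

-- ===== PORT B =====
-- literal port of B: set of distinct statuses, then two membership probes
def rollup_status_py_alt (checks : List (List (String × String))) : String :=
  let statuses : PySem.Set (Option String) :=
    PySem.Set.ofList (checks.map (fun c => (PySem.Dict.mk c).get? "status"))
  if PySem.Set.contains statuses (some "fail") then "fail"
  else if PySem.Set.contains statuses (some "warning") then "warning"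
  else "pass"

-- ===== PRECONDITION & SPEC =====
def Spec_rollup_status_py (checks : List (List (String × String))) (out : String) : Prop := out = rollup_status_py_alt checks
instance (checks : List (List (String × String))) (out : String) : Decidable (Spec_rollup_status_py checks out) := by unfold Spec_rollup_status_py; infer_instance

-- ===== CLAIM (what is proved, stated in full; the proofs are below) =====
def Claim_equal_rollup_status_py : Prop := ∀ (checks : List (List (String × String))), Dom_rollup_status_py checks → Spec_rollup_status_py checks (rollup_status_py checks)

-- ===== LEMMAS AND PROOFS =====

-- A's loop computes: "fail" if any status is "fail", else "warning" if any is "warning", else the accumulator.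
lemma rollupGoA_eq (checks : List (List (String × String))) (overall : String) :
    rollupGoA checks overall =
      if (checks.map (fun c => (PySem.Dict.mk c).get? "status")).contains (some "fail") then "fail"
      else if (checks.map (fun c => (PySem.Dict.mk c).get? "status")).contains (some "warning") then "warning"
      else overall := by
  induction checks generalizing overall with
  | nil => simp [rollupGoA]
  | cons c rest ih =>
    simp only [rollupGoA, List.map_cons, List.contains_cons]
    by_cases hf : (PySem.Dict.mk c).get? "status" = some "fail"
    · simp [hf]
    · by_cases hw : (PySem.Dict.mk c).get? "status" = some "warning"
      · simp [hw, ih]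
      · simp only [hf, hw, if_false, ih]
        have h1 : ((some "fail" : Option String) == (PySem.Dict.mk c).get? "status") = false := by
          simp; exact fun h => hf h.symm
        have h2 : ((some "warning" : Option String) == (PySem.Dict.mk c).get? "status") = false := by
          simp; exact fun h => hw h.symm
        simp [h1, h2]

lemma set_contains_iff_list_contains (xs : List (Option String)) (x : Option String) :
    PySem.Set.contains (PySem.Set.ofList xs) x = xs.contains x := by
  have h1 : PySem.Set.contains (PySem.Set.ofList xs) x = decide (x ∈ PySem.Set.ofList xs) := by
    simp [PySem.Set.contains]
  rw [h1]
  simp [PySem.Set.mem_ofList]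

-- ===== VERDICT (by name: the statement is the Claim_ definition above) =====
theorem rollup_status_py_spec : Claim_equal_rollup_status_py := by
  intro checks _
  unfold Spec_rollup_status_py rollup_status_py rollup_status_py_alt
  rw [rollupGoA_eq]
  simp only [set_contains_iff_list_contains]
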